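-- pv_equiv track=rewrite | github.com/dgun00/ClipRoute | Data/v-6(berry)/pipeline/step2_1_infer_days.py | _infer_day_from_positions
-- ===== SOURCE A (Python) =====
-- from typing import Any, Dict, List, Optional
--
-- def _infer_day_from_positions(positions: List[Dict[str, Any]], mention_idx: int, start_day: int = 1) -> int:
--     if not positions:
--         return max(1, int(start_day or 1))
--
--     day = max(1, int(start_day or 1))
--     for m in positions:
--         if mention_idx >= int(m.get("idx") or 0):
--             day = int(m.get("day") or day)
--         else:
--             break
--     return max(1, day)
-- ===== SOURCE B (Python) =====
-- def _infer_day_from_positions(positions, mention_idx, start_day=1):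
--     # Split the work: first find where the scan would stop (first position whose
--     # idx exceeds mention_idx), then take the LAST position in that prefix with a
--     # truthy day -- scanning backwards with an early return -- since the forward
--     # carry-forward loop's final value is exactly that last truthy day.
--     cut = next((i for i, m in enumerate(positions)
--                 if mention_idx < int(m.get("idx") or 0)), len(positions))
--     for m in reversed(positions[:cut]):
--         d = int(m.get("day") or 0)
--         if d:
--             return max(1, d)
--     return max(1, int(start_day or 1))
-- ===== Notes on version B (the rewrite author's own statement) =====
-- stated objective: alternative
-- what changed: Replaces the forward carry-forward loop (accumulating day with break) by first computing the cut index of the qualifying prefix and then scanning that prefix backwards for the last truthy day, returning it immediately.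
import Mathlib
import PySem

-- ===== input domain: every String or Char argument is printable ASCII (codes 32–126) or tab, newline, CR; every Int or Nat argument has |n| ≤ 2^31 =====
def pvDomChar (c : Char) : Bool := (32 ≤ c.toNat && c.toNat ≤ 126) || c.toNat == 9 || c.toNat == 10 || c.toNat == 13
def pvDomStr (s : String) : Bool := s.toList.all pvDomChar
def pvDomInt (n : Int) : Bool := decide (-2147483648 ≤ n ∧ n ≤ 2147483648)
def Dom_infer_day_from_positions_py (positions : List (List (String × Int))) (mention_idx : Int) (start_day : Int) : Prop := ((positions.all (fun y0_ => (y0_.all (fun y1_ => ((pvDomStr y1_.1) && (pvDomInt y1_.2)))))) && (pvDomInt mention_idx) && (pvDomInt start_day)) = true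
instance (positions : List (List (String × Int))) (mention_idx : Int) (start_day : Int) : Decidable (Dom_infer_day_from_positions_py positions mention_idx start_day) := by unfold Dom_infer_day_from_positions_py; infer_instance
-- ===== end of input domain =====

-- B replaces A's forward carry-forward loop by a cut-index computation followed by a
-- backward scan for the last truthy day (alternative decomposition, same cost).


-- ===== PORT A =====
-- m.get(k) or 0  (None and 0 are both falsy, so this is lookup-with-default-0)
def pvGetOr0A (m : List (String × Int)) (k : String) : Int :=
  ((PySem.Dict.mk m).get? k).getD 0

-- the for-loop with break, carrying `day`
def pvLoopA (positions : List (List (String × Int))) (mention_idx : Int) (day : Int) : Int :=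
  match positions with
  | [] => day
  | m :: rest =>
    if pvGetOr0A m "idx" ≤ mention_idx then
      -- day = int(m.get("day") or day)
      pvLoopA rest mention_idx (if pvGetOr0A m "day" = 0 then day else pvGetOr0A m "day")
    else day

def infer_day_from_positions_py (positions : List (List (String × Int))) (mention_idx : Int) (start_day : Int) : Int :=
  if positions = [] then max 1 (if start_day = 0 then 1 else start_day)
  else max 1 (pvLoopA positions mention_idx (max 1 (if start_day = 0 then 1 else start_day)))

-- ===== PORT B =====
def pvGetOr0B (m : List (String × Int)) (k : String) : Int :=
  ((PySem.Dict.mk m).get? k).getD 0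

-- cut = next((i for i, m in enumerate(positions) if mention_idx < int(m.get("idx") or 0)), len(positions))
def pvCutB (positions : List (List (String × Int))) (mention_idx : Int) : Nat :=
  match positions with
  | [] => 0
  | m :: rest => if mention_idx < pvGetOr0B m "idx" then 0 else pvCutB rest mention_idx + 1

-- the backward scan with early return; fallback max(1, int(start_day or 1))
def pvRevB (ms : List (List (String × Int))) (start_day : Int) : Int :=
  match ms with
  | [] => max 1 (if start_day = 0 then 1 else start_day)
  | m :: rest => if pvGetOr0B m "day" = 0 then pvRevB rest start_day else max 1 (pvGetOr0B m "day")

def infer_day_from_positions_py_alt (positions : List (List (String × Int))) (mention_idx : Int) (start_day : Int) : Int :=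
  pvRevB ((positions.take (pvCutB positions mention_idx)).reverse) start_day

-- ===== PRECONDITION & SPEC =====
def Spec_infer_day_from_positions_py (positions : List (List (String × Int))) (mention_idx : Int) (start_day : Int) (out : Int) : Prop := out = infer_day_from_positions_py_alt positions mention_idx start_day
instance (positions : List (List (String × Int))) (mention_idx : Int) (start_day : Int) (out : Int) : Decidable (Spec_infer_day_from_positions_py positions mention_idx start_day out) := by unfold Spec_infer_day_from_positions_py; infer_instance

-- ===== CLAIM (what is proved, stated in full; the proofs are below) =====
def Claim_equal_infer_day_from_positions_py : Prop := ∀ (positions : List (List (String × Int))) (mention_idx : Int) (start_day : Int), Dom_infer_day_from_positions_py positions mention_idx start_day → Spec_infer_day_from_positions_py positions mention_idx start_day (infer_day_from_positions_py positions mention_idx start_day)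

-- ===== LEMMAS AND PROOFS =====

-- proof-side: the break-free forward fold over a prefix
def pvFoldDays (ms : List (List (String × Int))) (day : Int) : Int :=
  match ms with
  | [] => day
  | m :: rest => pvFoldDays rest (if pvGetOr0A m "day" = 0 then day else pvGetOr0A m "day")

lemma pvGetAB (m : List (String × Int)) (k : String) : pvGetOr0B m k = pvGetOr0A m k := rfl

-- A's loop equals the fold over the prefix cut by B's cut index
lemma loopA_eq_fold (positions : List (List (String × Int))) (mention_idx day : Int) :
    pvLoopA positions mention_idx day
      = pvFoldDays (positions.take (pvCutB positions mention_idx)) day := by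
  induction positions generalizing day with
  | nil => simp [pvLoopA, pvCutB, pvFoldDays]
  | cons m rest ih =>
    by_cases h : pvGetOr0A m "idx" ≤ mention_idx
    · have h' : ¬ mention_idx < pvGetOr0B m "idx" := by rw [pvGetAB]; omega
      simp [pvLoopA, pvCutB, h, h', pvFoldDays, ih]
    · have h' : mention_idx < pvGetOr0B m "idx" := by rw [pvGetAB]; omega
      simp [pvLoopA, pvCutB, h, h', pvFoldDays]

-- generic-base version of the backward scan (only for the proof)
def pvRevAux (ms : List (List (String × Int))) (b : Int) : Int :=
  match ms with
  | [] => b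
  | m :: rest => if pvGetOr0B m "day" = 0 then pvRevAux rest b else max 1 (pvGetOr0B m "day")

lemma revB_eq_aux (ms : List (List (String × Int))) (start_day : Int) :
    pvRevB ms start_day = pvRevAux ms (max 1 (if start_day = 0 then 1 else start_day)) := by
  induction ms with
  | nil => rfl
  | cons m rest ih => simp [pvRevB, pvRevAux, ih]

lemma revAux_append (xs : List (List (String × Int))) (m : List (String × Int)) (b : Int) :
    pvRevAux (xs ++ [m]) b
      = pvRevAux xs (if pvGetOr0B m "day" = 0 then b else max 1 (pvGetOr0B m "day")) := by
  induction xs with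
  | nil => rfl
  | cons x rest ih => simp [pvRevAux, ih]

lemma revAux_reverse_eq_fold (ms : List (List (String × Int))) (day : Int) :
    pvRevAux ms.reverse (max 1 day) = max 1 (pvFoldDays ms day) := by
  induction ms generalizing day with
  | nil => rfl
  | cons m rest ih =>
    have : pvRevAux (rest.reverse ++ [m]) (max 1 day)
        = pvRevAux rest.reverse (max 1 (if pvGetOr0A m "day" = 0 then day else pvGetOr0A m "day")) := by
      rw [revAux_append, pvGetAB]
      by_cases h : pvGetOr0A m "day" = 0 <;> simp [h]
    simp only [List.reverse_cons, this, ih, pvFoldDays]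

-- ===== VERDICT (by name: the statement is the Claim_ definition above) =====
theorem infer_day_from_positions_py_spec : Claim_equal_infer_day_from_positions_py := by
  intro positions mention_idx start_day _
  unfold Spec_infer_day_from_positions_py infer_day_from_positions_py infer_day_from_positions_py_alt
  by_cases hnil : positions = []
  · subst hnil; simp [pvCutB, pvRevB]
  · have hseed : max 1 (max 1 (if start_day = 0 then 1 else start_day))
        = max 1 (if start_day = 0 then 1 else start_day) := by omega
    rw [if_neg hnil, loopA_eq_fold, revB_eq_aux, ← revAux_reverse_eq_fold, hseed]
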